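-- pv_equiv track=rewrite | github.com/SeleznevAS-dev/algorithms_1 | tasks/task_5.py | massdriver
-- ===== SOURCE A (Python) =====
-- def massdriver(activate: list[int]) -> int:
--     dct = {}
--     mn = len(activate)
--     for i in range(len(activate)):
--         if dct.get(activate[i]) is None:
--             dct[activate[i]] = i
--         elif dct.get(activate[i]) < mn:
--             mn = dct.get(activate[i])
--     if mn == len(activate):
--         mn = -1
--     return mn
-- ===== SOURCE B (Python) =====
-- def massdriver(activate: list[int]) -> int:
--     counts = {}
--     for x in activate:
--         counts[x] = counts.get(x, 0) + 1
--     for i, x in enumerate(activate):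
--         if counts[x] >= 2:
--             return i
--     return -1
-- ===== Notes on version B (the rewrite author's own statement) =====
-- stated objective: simpler
-- what changed: Replaces A's single pass that stores each value's first index in a dict and tracks a running minimum with a frequency-count pass followed by a plain left-to-right scan that early-returns the first index whose value occurs at least twice.
import Mathlib
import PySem

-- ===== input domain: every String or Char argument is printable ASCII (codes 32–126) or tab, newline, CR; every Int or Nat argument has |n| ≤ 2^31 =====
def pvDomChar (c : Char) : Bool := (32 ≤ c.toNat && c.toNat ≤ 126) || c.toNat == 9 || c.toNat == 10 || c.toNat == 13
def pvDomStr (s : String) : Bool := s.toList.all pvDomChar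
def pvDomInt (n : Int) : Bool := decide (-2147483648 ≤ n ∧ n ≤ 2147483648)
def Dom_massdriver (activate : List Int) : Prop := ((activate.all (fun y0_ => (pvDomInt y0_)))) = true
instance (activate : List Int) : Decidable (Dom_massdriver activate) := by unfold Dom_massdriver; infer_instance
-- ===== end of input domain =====

-- B replaces A's one-pass dict-of-first-indices + running minimum with a count table and a
-- separate early-returning scan for the first index whose value is duplicated (objective: simpler).

-- ===== PORT A =====
-- loop body of A: dct.get lookup, first-index insert, running-minimum update
def pvStepA (s : PySem.Dict Int Int × Int) : Int × Int → PySem.Dict Int Int × Int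
  | (i, x) =>
    match s.1.get? x with
    | none => (s.1.insert x i, s.2)
    | some j => (s.1, if j < s.2 then j else s.2)

-- `for i in range(len(activate))` with `activate[i]` is ported as a fold over
-- PySem.List.enumerate, whose pairs are exactly (i, activate[i]) for those i (always in range).
def massdriver (activate : List Int) : Int :=
  let st := (PySem.List.enumerate activate).foldl pvStepA (PySem.Dict.empty, (activate.length : Int))
  if st.2 = (activate.length : Int) then -1 else st.2

-- ===== PORT B =====
-- B's second loop: early return of the first enumerated index whose count is ≥ 2
def pvScanB (cnt : PySem.Dict Int Int) : List (Int × Int) → Int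
  | [] => -1
  | (i, x) :: t => if 2 ≤ cnt.getD x 0 then i else pvScanB cnt t

def massdriver_alt (activate : List Int) : Int :=
  let counts := activate.foldl (fun (d : PySem.Dict Int Int) x => d.insert x (d.getD x 0 + 1)) PySem.Dict.empty
  pvScanB counts (PySem.List.enumerate activate)

-- ===== PRECONDITION & SPEC =====
def Spec_massdriver (activate : List Int) (out : Int) : Prop := out = massdriver_alt activate
instance (activate : List Int) (out : Int) : Decidable (Spec_massdriver activate out) := by unfold Spec_massdriver; infer_instance

-- ===== CLAIM (what is proved, stated in full; the proofs are below) =====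
def Claim_equal_massdriver : Prop := ∀ (activate : List Int), Dom_massdriver activate → Spec_massdriver activate (massdriver activate)


-- ===== LEMMAS AND PROOFS =====

-- first index of a value occurring at least twice (the common reference)
def pvDupIdx (p : List Int) : Option Nat := p.findIdx? (fun y => decide (2 ≤ p.count y))

def pvOMin : Option Nat → Option Nat → Option Nat
  | none, b => b
  | some a, none => some a
  | some a, some b => some (min a b)

lemma pvOMin_zero_left (b : Option Nat) : pvOMin (some 0) b = some 0 := by
  cases b <;> simp [pvOMin]

lemma pvOMin_zero_right (a : Option Nat) : pvOMin a (some 0) = some 0 := by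
  cases a <;> simp [pvOMin]

lemma pvOMin_map_succ (a b : Option Nat) :
    pvOMin (a.map (· + 1)) (b.map (· + 1)) = (pvOMin a b).map (· + 1) := by
  cases a <;> cases b <;> simp [pvOMin]

lemma pvFindIdx_congr (f g : Int → Bool) (p : List Int) (h : ∀ y ∈ p, f y = g y) :
    p.findIdx? f = p.findIdx? g := by
  induction p with
  | nil => rfl
  | cons y t ih =>
    simp only [List.findIdx?_cons, h y (List.mem_cons_self),
      ih (fun z hz => h z (List.mem_cons_of_mem _ hz))]

lemma pvFindIdx_or (f g : Int → Bool) (p : List Int) :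
    p.findIdx? (fun y => f y || g y) = pvOMin (p.findIdx? f) (p.findIdx? g) := by
  induction p with
  | nil => rfl
  | cons y t ih =>
    simp only [List.findIdx?_cons]
    cases hf : f y <;> cases hg : g y <;>
      simp [ih, pvOMin_zero_left, pvOMin_zero_right, pvOMin_map_succ]

lemma pvFindIdx_lt (f : Int → Bool) (p : List Int) (k : Nat) (h : p.findIdx? f = some k) :
    k < p.length := by
  induction p generalizing k with
  | nil => simp at h
  | cons y t ih =>
    rw [List.findIdx?_cons] at h
    split at h
    · simp only [Option.some.injEq] at h
      simp only [List.length_cons]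
      omega
    · rcases Option.map_eq_some_iff.1 h with ⟨k', hk', rfl⟩
      have := ih k' hk'
      simp only [List.length_cons]
      omega

-- the A-side invariant: after folding the enumerated prefix p from (∅, n) with p.length ≤ n,
-- the dict maps each value to its first index in p, and the min-accumulator is the first
-- duplicated index of p (sentinel n when there is none)
lemma pvFoldA_inv (p : List Int) : ∀ n : Int, (p.length : Int) ≤ n →
    (∀ v, ((PySem.List.enumerate p).foldl pvStepA (PySem.Dict.empty, n)).1.get? v
        = (p.findIdx? (fun y => y == v)).map (fun k => (k : Int)))
  ∧ ((PySem.List.enumerate p).foldl pvStepA (PySem.Dict.empty, n)).2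
      = (match pvDupIdx p with | some k => (k : Int) | none => n) := by
  induction p using List.reverseRecOn with
  | nil => intro n hn; exact ⟨fun v => by simp [PySem.Dict.get?_empty], by simp [pvDupIdx]⟩
  | append_singleton p x ih =>
    intro n hn
    have hn' : (p.length : Int) ≤ n := by simp at hn; omega
    obtain ⟨ihd, ihm⟩ := ih n hn'
    rw [PySem.List.enumerate_append]
    simp only [List.foldl_append, PySem.List.enumerate_cons, PySem.List.enumerate_nil,
      List.foldl_cons, List.foldl_nil, zero_add]
    set st := (PySem.List.enumerate p).foldl pvStepA (PySem.Dict.empty, n)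
    simp only [pvStepA]
    cases hget : st.1.get? x with
    | none =>
      have hF : p.findIdx? (fun y => y == x) = none := by
        have h := ihd x; rw [hget] at h
        cases hF2 : p.findIdx? (fun y => y == x) with
        | none => rfl
        | some j => rw [hF2] at h; simp at h
      have hxnp : x ∉ p := by
        intro hx
        have := (List.findIdx?_eq_none_iff.1 hF) x hx
        simp at this
      have hcx : p.count x = 0 := List.count_eq_zero.2 hxnp
      have hq : pvDupIdx (p ++ [x]) = pvDupIdx p := by
        unfold pvDupIdx
        rw [List.findIdx?_append]
        have h1 : ([x].findIdx? fun y => decide (2 ≤ (p ++ [x]).count y)) = none := by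
          simp [List.count_append, hcx]
        have h2 : (p.findIdx? fun y => decide (2 ≤ (p ++ [x]).count y))
            = p.findIdx? fun y => decide (2 ≤ p.count y) := by
          apply pvFindIdx_congr
          intro y hy
          have hyx : (x == y) = false := by
            simp only [beq_eq_false_iff_ne]
            intro h; exact hxnp (h ▸ hy)
          simp [List.count_append, List.count_singleton, hyx]
        rw [h1, h2]
        simp
      constructor
      · intro v
        simp only []
        rw [PySem.Dict.get?_insert, List.findIdx?_append]
        by_cases hv : v = x
        · subst hv
          simp [hF, List.findIdx?_cons]
        · have hxv : (x == v) = false := by simp [Ne.symm hv]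
          simp [hv, hxv, ihd v, List.findIdx?_cons]
      · simp only []
        rw [ihm, hq]
    | some jI =>
      obtain ⟨j, hF, rfl⟩ : ∃ j : Nat, p.findIdx? (fun y => y == x) = some j ∧ jI = (j : Int) := by
        have h := ihd x; rw [hget] at h
        cases hF2 : p.findIdx? (fun y => y == x) with
        | none => rw [hF2] at h; simp at h
        | some j => rw [hF2] at h; simp at h; exact ⟨j, rfl, h⟩
      have hjp : j < p.length := pvFindIdx_lt _ _ _ hF
      have hxp : x ∈ p := by
        by_contra hx
        rw [List.findIdx?_eq_none_iff.2 (fun y hy => by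
          simp only [beq_eq_false_iff_ne]; intro h; exact hx (h ▸ hy))] at hF
        simp at hF
      have hcx : 1 ≤ p.count x := List.one_le_count_iff.2 hxp
      have hq : pvDupIdx (p ++ [x]) = (pvOMin (pvDupIdx p) (some j)).or (some p.length) := by
        unfold pvDupIdx
        rw [List.findIdx?_append]
        have h1 : ([x].findIdx? fun y => decide (2 ≤ (p ++ [x]).count y)) = some 0 := by
          simp [List.count_append]
          omega
        have h2 : (p.findIdx? fun y => decide (2 ≤ (p ++ [x]).count y))
            = p.findIdx? fun y => (decide (2 ≤ p.count y) || (y == x)) := by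
          apply pvFindIdx_congr
          intro y hy
          by_cases hyx : y = x
          · subst hyx
            simp [List.count_append]
            omega
          · have hxy : (x == y) = false := by simp [Ne.symm hyx]
            simp [List.count_append, List.count_singleton, hxy, hyx]
        rw [h1, h2, pvFindIdx_or, hF]
        simp
      constructor
      · intro v
        simp only []
        rw [List.findIdx?_append]
        cases hv : p.findIdx? (fun y => y == v) with
        | some k => simp [ihd v, hv]
        | none =>
          have hxv : (x == v) = false := by
            by_contra hc
            simp only [beq_eq_false_iff_ne, ne_eq, not_not] at hc
            rw [← hc] at hv
            rw [hv] at hF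
            simp at hF
          simp [ihd v, hv, hxv, List.findIdx?_cons]
      · simp only []
        rw [ihm, hq]
        cases hD : pvDupIdx p with
        | none =>
          have hjn : (j : Int) < n := by omega
          simp [pvOMin, hjn]
        | some k =>
          simp only [pvOMin, Option.some_or]
          rw [Nat.min_def]
          split_ifs <;> omega

lemma pvA_eq_ref (xs : List Int) :
    massdriver xs = (match pvDupIdx xs with | some k => (k : Int) | none => -1) := by
  unfold massdriver
  obtain ⟨-, hm⟩ := pvFoldA_inv xs (xs.length : Int) le_rfl
  simp only [hm]
  cases hD : pvDupIdx xs with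
  | none => simp
  | some k =>
    have hk : k < xs.length := pvFindIdx_lt _ _ _ hD
    have hne : ((k : Int)) ≠ (xs.length : Int) := by omega
    simp [hne]

lemma pvScanB_enum (cnt : PySem.Dict Int Int) (l : List Int) : ∀ s : Int,
    pvScanB cnt (PySem.List.enumerate l s)
      = (match l.findIdx? (fun y => decide (2 ≤ cnt.getD y 0)) with
         | some k => s + (k : Int) | none => -1) := by
  induction l with
  | nil => intro s; rfl
  | cons y t ih =>
    intro s
    rw [PySem.List.enumerate_cons]
    by_cases h : 2 ≤ cnt.getD y 0
    · simp [pvScanB, List.findIdx?_cons, h]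
    · cases hT : t.findIdx? (fun y => decide (2 ≤ cnt.getD y 0)) with
      | none => simp [pvScanB, List.findIdx?_cons, h, ih (s + 1), hT]
      | some k =>
        rw [List.findIdx?_cons]
        have hb : (decide (2 ≤ cnt.getD y 0)) = false := by simp [h]
        rw [hb]
        simp only [Bool.false_eq_true, if_false, hT, Option.map_some]
        simp only [pvScanB]
        rw [if_neg h, ih (s + 1), hT]
        push_cast
        ring

lemma pvB_eq_ref (xs : List Int) :
    massdriver_alt xs = (match pvDupIdx xs with | some k => (k : Int) | none => -1) := by
  unfold massdriver_alt
  rw [pvScanB_enum]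
  have hc : (xs.findIdx? fun y =>
      decide (2 ≤ (xs.foldl (fun (d : PySem.Dict Int Int) x => d.insert x (d.getD x 0 + 1)) PySem.Dict.empty).getD y 0))
      = xs.findIdx? fun y => decide (2 ≤ xs.count y) := by
    apply pvFindIdx_congr
    intro y _
    rw [PySem.Dict.getD_foldl_insert_add_one, PySem.Dict.getD_empty]
    rw [decide_eq_decide]
    omega
  rw [hc]
  unfold pvDupIdx
  cases h : xs.findIdx? (fun y => decide (2 ≤ xs.count y)) <;> simp

-- ===== VERDICT (by name: the statement is the Claim_ definition above) =====
theorem massdriver_spec : Claim_equal_massdriver := by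
  intro activate _
  unfold Spec_massdriver
  rw [pvA_eq_ref, pvB_eq_ref]
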